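-- pv_equiv track=rewrite | github.com/perpetualpatzer/mexican_trains | trains.py | pick_start_tile
-- ===== SOURCE A (Python) =====
-- def check_if_double(tile: list):
--     """Checks if a tile is a double
--     """
--     return tile[0] == tile[1]
--
-- def pick_start_tile(hands: list):
--     """ Takes set of player hands, checks who has the highest double and returns
--         the starting player and starting tile number
--     """
--     doubles = {}
--
--
--     # write down all the doubles
--     for player, hand in enumerate(hands):
--         for tile in hand:
--             if check_if_double(tile):
--                 doubles[tile[0]] = player
--
--     # find the highest double. If no doubles, return None for start_player and starting tile
--     try:
--         max_double = max(doubles.keys())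
--     except ValueError:
--         return None, None
--
--     start_player = doubles[max_double]
--
--     return start_player, max_double
-- ===== SOURCE B (Python) =====
-- def pick_start_tile(hands: list):
--     """ Takes set of player hands, checks who has the highest double and returns
--         the starting player and starting tile number
--     """
--     best_player = None
--     best_value = None
--     for player, hand in enumerate(hands):
--         for tile in hand:
--             if tile[0] == tile[1] and (best_value is None or tile[0] >= best_value):
--                 best_player, best_value = player, tile[0]
--     return best_player, best_value
-- ===== Notes on version B (the rewrite author's own statement) =====
-- stated objective: simpler
-- what changed: Replaces the two-phase build-a-dict-of-doubles-then-max-its-keys (with a try/except for the empty case) by a single running-max pass keeping two scalars, using >= so a later player with an equal double wins exactly like the dict's last overwrite.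
import Mathlib
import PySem

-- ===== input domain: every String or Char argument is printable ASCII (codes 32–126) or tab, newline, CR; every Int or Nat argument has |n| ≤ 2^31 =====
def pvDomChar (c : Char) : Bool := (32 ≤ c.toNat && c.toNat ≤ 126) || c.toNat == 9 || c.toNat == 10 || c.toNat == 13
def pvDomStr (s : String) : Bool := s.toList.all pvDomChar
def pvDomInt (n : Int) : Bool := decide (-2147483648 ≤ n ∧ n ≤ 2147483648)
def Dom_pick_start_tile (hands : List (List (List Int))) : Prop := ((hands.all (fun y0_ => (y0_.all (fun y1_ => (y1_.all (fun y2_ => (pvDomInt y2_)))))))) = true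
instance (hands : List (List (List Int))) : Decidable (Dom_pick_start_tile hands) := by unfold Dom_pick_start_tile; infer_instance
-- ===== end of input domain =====

-- B replaces A's build-a-dict-of-doubles-then-max-its-keys two-phase structure by a single
-- running-max pass keeping two scalars (objective: simpler).


-- ===== PORT A =====
def check_if_double (tile : List Int) : Bool :=
  PySem.List.pyGet? tile 0 == PySem.List.pyGet? tile 1

def pick_start_tile (hands : List (List (List Int))) : Option Int × Option Int :=
  let doubles : PySem.Dict Int Int :=
    (PySem.List.enumerate hands).foldl
      (fun d ph => ph.2.foldl
        (fun d tile =>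
          if check_if_double tile then
            d.insert ((PySem.List.pyGet? tile 0).getD 0) ph.1
          else d) d)
      PySem.Dict.empty
  match PySem.List.max? doubles.keys (fun x => x) with
  | none => (none, none)
  | some m => (doubles.get? m, some m)

-- ===== PORT B =====
def pick_start_tile_alt (hands : List (List (List Int))) : Option Int × Option Int :=
  let best : Option (Int × Int) :=
    (PySem.List.enumerate hands).foldl
      (fun s ph => ph.2.foldl
        (fun s tile =>
          if PySem.List.pyGet? tile 0 == PySem.List.pyGet? tile 1 then
            match s with
            | none => some (ph.1, (PySem.List.pyGet? tile 0).getD 0)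
            | some (bp, bv) =>
              if bv ≤ (PySem.List.pyGet? tile 0).getD 0 then
                some (ph.1, (PySem.List.pyGet? tile 0).getD 0)
              else some (bp, bv)
          else s) s)
      none
  match best with
  | none => (none, none)
  | some pv => (some pv.1, some pv.2)

-- ===== PRECONDITION & SPEC =====
-- Pre_ excludes exactly the inputs where the Python A raises IndexError: a tile with fewer
-- than two entries (tile[0]/tile[1] in check_if_double).
def Pre_pick_start_tile (hands : List (List (List Int))) : Prop :=
  ∀ hand ∈ hands, ∀ tile ∈ hand, 2 ≤ tile.length
instance (hands : List (List (List Int))) : Decidable (Pre_pick_start_tile hands) := by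
  unfold Pre_pick_start_tile; infer_instance
def pvWitness_pick_start_tile : List (List (List Int)) := [[[1, 1], [2, 3]], [[4, 4]]]

def Spec_pick_start_tile (hands : List (List (List Int))) (out : Option Int × Option Int) : Prop := out = pick_start_tile_alt hands
instance (hands : List (List (List Int))) (out : Option Int × Option Int) : Decidable (Spec_pick_start_tile hands out) := by unfold Spec_pick_start_tile; infer_instance

-- ===== CLAIM (what is proved, stated in full; the proofs are below) =====
def Claim_equal_pick_start_tile : Prop := ∀ (hands : List (List (List Int))), Dom_pick_start_tile hands → Pre_pick_start_tile hands → Spec_pick_start_tile hands (pick_start_tile hands)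

-- ===== LEMMAS AND PROOFS =====

-- A's final extraction from the dict of doubles
def pvExtract (d : PySem.Dict Int Int) : Option Int × Option Int :=
  match PySem.List.max? d.keys (fun x => x) with
  | none => (none, none)
  | some m => (d.get? m, some m)

-- B's final extraction from the running best
def pvOut (s : Option (Int × Int)) : Option Int × Option Int :=
  match s with
  | none => (none, none)
  | some pv => (some pv.1, some pv.2)

-- B's update of the running best by a double of value v seen in player pl's hand
def pvBUpd (pl v : Int) (s : Option (Int × Int)) : Option (Int × Int) :=
  match s with
  | none => some (pl, v)
  | some pv =>
    match pv with
    | (bp, bv) => if bv ≤ v then some (pl, v) else some (bp, bv)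

-- invariant relating A's dict to B's running best
def pvRel (d : PySem.Dict Int Int) (s : Option (Int × Int)) : Prop :=
  d.keys.Nodup ∧ pvExtract d = pvOut s

lemma pv_max?_id_of_isMax {l : List Int} {m : Int} (hm : m ∈ l)
    (hmax : ∀ y ∈ l, y ≤ m) : PySem.List.max? l (fun x => x) = some m := by
  cases hmx : PySem.List.max? l (fun x => x) with
  | none =>
    rw [PySem.List.max?_eq_none_iff l (fun x => x)] at hmx
    simp [hmx] at hm
  | some m' =>
    have h1 : m ≤ m' := PySem.List.max?_isMax hmx m hm
    have h2 : m' ≤ m := hmax m' (PySem.List.max?_mem hmx)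
    rw [le_antisymm h2 h1]

lemma pv_step (d : PySem.Dict Int Int) (s : Option (Int × Int)) (k p : Int)
    (h : pvRel d s) : pvRel (d.insert k p) (pvBUpd p k s) := by
  obtain ⟨hnd, hex⟩ := h
  have hnd' : (d.insert k p).keys.Nodup := PySem.Dict.nodup_keys_insert d k p hnd
  cases s with
  | none =>
    -- extract d = (none,none) forces max? d.keys = none, i.e. d.keys = []
    have hkeys : d.keys = [] := by
      unfold pvExtract pvOut at hex
      cases hmx : PySem.List.max? d.keys (fun x => x) with
      | none => exact (PySem.List.max?_eq_none_iff d.keys (fun x => x)).mp hmx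
      | some m => rw [hmx] at hex; simp at hex
    refine ⟨hnd', ?_⟩
    have hk : k ∈ (d.insert k p).keys := by
      rw [PySem.Dict.mem_keys_insert d k k p]; exact Or.inl rfl
    have hmax : ∀ y ∈ (d.insert k p).keys, y ≤ k := by
      intro y hy
      rcases (PySem.Dict.mem_keys_insert d k y p).mp hy with h1 | h1
      · omega
      · rw [hkeys] at h1; simp at h1
    unfold pvExtract pvOut pvBUpd
    rw [pv_max?_id_of_isMax hk hmax]
    simp [PySem.Dict.get?_insert_self]
  | some b =>
    obtain ⟨bp, bv⟩ := b
    have hpair : PySem.List.max? d.keys (fun x => x) = some bv ∧ d.get? bv = some bp := by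
      unfold pvExtract pvOut at hex
      cases hmx : PySem.List.max? d.keys (fun x => x) with
      | none => rw [hmx] at hex; simp at hex
      | some m =>
        rw [hmx] at hex
        simp only [Prod.mk.injEq] at hex
        obtain ⟨h1, h2⟩ := hex
        rw [Option.some_inj] at h2
        subst h2
        exact ⟨rfl, by simpa using h1⟩
    obtain ⟨hmx, hget⟩ := hpair
    have hbv_mem : bv ∈ d.keys := PySem.List.max?_mem hmx
    have hbv_max : ∀ y ∈ d.keys, y ≤ bv := fun y hy => PySem.List.max?_isMax hmx y hy
    by_cases hle : bv ≤ k
    · -- new maximum is k, new owner p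
      refine ⟨hnd', ?_⟩
      have hk : k ∈ (d.insert k p).keys := by
        rw [PySem.Dict.mem_keys_insert d k k p]; exact Or.inl rfl
      have hmax : ∀ y ∈ (d.insert k p).keys, y ≤ k := by
        intro y hy
        rcases (PySem.Dict.mem_keys_insert d k y p).mp hy with h1 | h1
        · omega
        · have := hbv_max y h1; omega
      unfold pvExtract pvOut pvBUpd
      rw [pv_max?_id_of_isMax hk hmax]
      simp [PySem.Dict.get?_insert_self, hle]
    · -- maximum stays bv with owner bp
      refine ⟨hnd', ?_⟩
      have hne : bv ≠ k := by omega
      have hbv : bv ∈ (d.insert k p).keys := by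
        rw [PySem.Dict.mem_keys_insert d k bv p]; exact Or.inr hbv_mem
      have hmax : ∀ y ∈ (d.insert k p).keys, y ≤ bv := by
        intro y hy
        rcases (PySem.Dict.mem_keys_insert d k y p).mp hy with h1 | h1
        · omega
        · exact hbv_max y h1
      unfold pvExtract pvOut pvBUpd
      rw [pv_max?_id_of_isMax hbv hmax]
      simp [PySem.Dict.get?_insert_of_ne d p hne, hget, hle]

lemma pv_fold {α : Type} (fA : PySem.Dict Int Int → α → PySem.Dict Int Int)
    (fB : Option (Int × Int) → α → Option (Int × Int))
    (hstep : ∀ d s x, pvRel d s → pvRel (fA d x) (fB s x)) :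
    ∀ (l : List α) (d : PySem.Dict Int Int) (s : Option (Int × Int)),
      pvRel d s → pvRel (l.foldl fA d) (l.foldl fB s)
  | [], _, _, h => h
  | x :: t, d, s, h => pv_fold fA fB hstep t (fA d x) (fB s x) (hstep d s x h)

-- ===== VERDICT (by name: the statement is the Claim_ definition above) =====
theorem pick_start_tile_spec : Claim_equal_pick_start_tile := by
  intro hands _ _
  unfold Spec_pick_start_tile pick_start_tile pick_start_tile_alt
  have hrel : pvRel
      ((PySem.List.enumerate hands).foldl
        (fun d ph => ph.2.foldl
          (fun d tile =>
            if check_if_double tile then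
              d.insert ((PySem.List.pyGet? tile 0).getD 0) ph.1
            else d) d)
        PySem.Dict.empty)
      ((PySem.List.enumerate hands).foldl
        (fun s ph => ph.2.foldl
          (fun s tile =>
            if PySem.List.pyGet? tile 0 == PySem.List.pyGet? tile 1 then
              match s with
              | none => some (ph.1, (PySem.List.pyGet? tile 0).getD 0)
              | some (bp, bv) =>
                if bv ≤ (PySem.List.pyGet? tile 0).getD 0 then
                  some (ph.1, (PySem.List.pyGet? tile 0).getD 0)
                else some (bp, bv)
            else s) s)
        none) := by
    apply pv_fold
    · intro d s ph hds
      refine pv_fold _ _ ?_ ph.2 d s hds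
      intro d s tile hds
      by_cases hc : (PySem.List.pyGet? tile 0 == PySem.List.pyGet? tile 1) = true
      · simp only [check_if_double, hc, if_true]
        cases s with
        | none => exact pv_step d none _ ph.1 hds
        | some b =>
          obtain ⟨bp, bv⟩ := b
          exact pv_step d (some (bp, bv)) _ ph.1 hds
      · rw [Bool.not_eq_true] at hc
        simp only [check_if_double, hc, Bool.false_eq_true, if_false]
        exact hds
    · refine ⟨PySem.Dict.nodup_keys_empty, ?_⟩
      unfold pvExtract pvOut
      simp [PySem.Dict.keys_empty, PySem.List.max?]
  have hfin := hrel.2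
  unfold pvExtract pvOut at hfin
  exact hfin
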